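-- pv_equiv track=rewrite | github.com/joshuapark2/DSA-Fundamentals | A Common-Sense Guide to Data Structures and Algorithms/Chapter 7 - Big O in Everyday Code/7.2_Word_Builder.py | word_builder
-- ===== SOURCE A (Python) =====
-- def word_builder(array):
--     collection = []
--     for i in range(len(array)):
--         for j in range(len(array)):
--             for k in range(len(array)):
--                 if i != j and j != k and i != k:
--                     collection.append(array[i] + array[j] + array[k])
--     return collection
-- ===== SOURCE B (Python) =====
-- def word_builder(array):
--     def picks(xs):
--         if not xs:
--             return []
--         head, tail = xs[0], xs[1:]
--         return [(head, tail)] + [(a, [head] + rest) for a, rest in picks(tail)]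
--     return [a + b + c
--             for a, rest in picks(array)
--             for b, rest2 in picks(rest)
--             for c in rest2]
-- ===== Notes on version B (the rewrite author's own statement) =====
-- stated objective: alternative
-- what changed: B generates the ordered triples of distinct elements directly, by recursively picking an element and recursing on the remainder (a hand-rolled permutations(array,3)), instead of scanning all n^3 index triples and filtering out index collisions.
import Mathlib
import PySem

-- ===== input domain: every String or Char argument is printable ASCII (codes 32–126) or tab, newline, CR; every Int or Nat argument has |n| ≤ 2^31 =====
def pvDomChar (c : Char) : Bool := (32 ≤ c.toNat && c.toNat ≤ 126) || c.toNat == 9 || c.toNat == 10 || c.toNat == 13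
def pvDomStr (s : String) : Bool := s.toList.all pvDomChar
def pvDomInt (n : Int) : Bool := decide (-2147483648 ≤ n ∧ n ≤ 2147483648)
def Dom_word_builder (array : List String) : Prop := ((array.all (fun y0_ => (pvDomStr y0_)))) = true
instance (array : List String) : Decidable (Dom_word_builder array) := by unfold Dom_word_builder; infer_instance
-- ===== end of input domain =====

-- B generates the ordered triples of distinct elements directly (hand-rolled permutations of length 3)
-- instead of A's scan over all n^3 index triples with an index-collision guard; same cost class, different algorithm.

-- ===== PORT A =====
-- literal port of A's three nested index loops with the i≠j≠k guard
def word_builder (array : List String) : List String :=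
  (List.range array.length).foldl (fun coll i =>
    (List.range array.length).foldl (fun coll j =>
      (List.range array.length).foldl (fun coll k =>
        if i ≠ j ∧ j ≠ k ∧ i ≠ k then
          coll ++ [array.getD i "" ++ array.getD j "" ++ array.getD k ""]
        else coll) coll) coll) []

-- ===== PORT B =====
-- picks xs = all (chosen element, remaining list) pairs, in index order (Source B's picks)
def pickOne : List String → List (String × List String)
  | [] => []
  | x :: xs => (x, xs) :: (pickOne xs).map (fun p => (p.1, x :: p.2))

def word_builder_alt (array : List String) : List String :=
  (pickOne array).flatMap (fun p =>
    (pickOne p.2).flatMap (fun q =>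
      q.2.map (fun c => p.1 ++ q.1 ++ c)))

-- ===== PRECONDITION & SPEC =====
def Spec_word_builder (array : List String) (out : List String) : Prop := out = word_builder_alt array
instance (array : List String) (out : List String) : Decidable (Spec_word_builder array out) := by unfold Spec_word_builder; infer_instance

-- ===== CLAIM (what is proved, stated in full; the proofs are below) =====
def Claim_equal_word_builder : Prop := ∀ (array : List String), Dom_word_builder array → Spec_word_builder array (word_builder array)

-- ===== LEMMAS AND PROOFS =====

-- index translation after erasing index i
def trIdx (i j : ℕ) : ℕ := if j < i then j else j - 1

theorem trIdx_inj {i j k : ℕ} (hj : j ≠ i) (hk : k ≠ i) : (trIdx i j = trIdx i k) ↔ j = k := by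
  unfold trIdx; split_ifs <;> omega

theorem flatMap_congr_mem {α β : Type} {l : List α} {f g : α → List β}
    (h : ∀ x ∈ l, f x = g x) : l.flatMap f = l.flatMap g := by
  induction l with
  | nil => rfl
  | cons a l ih =>
    simp only [List.flatMap_cons]
    rw [h a (by simp), ih (fun x hx => h x (by simp [hx]))]

theorem flatMap_nil_fun {α β : Type} (l : List α) : l.flatMap (fun _ => ([] : List β)) = [] := by
  induction l <;> simp_all

-- loop over all indices of xs except i, the body seeing the element and the translated index,
-- equals the loop over the indices of xs.eraseIdx i
theorem se {β : Type} :
    ∀ (xs : List String) (i : ℕ) (F : String → ℕ → List β), i < xs.length →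
      (List.range xs.length).flatMap
          (fun j => if j = i then [] else F (xs.getD j "") (trIdx i j))
        = (List.range (xs.length - 1)).flatMap (fun j' => F ((xs.eraseIdx i).getD j' "") j') := by
  intro xs
  induction xs with
  | nil => intro i F h; simp at h
  | cons x t ih =>
    intro i F h
    match i with
    | 0 =>
      simp only [List.length_cons, List.range_succ_eq_map, List.flatMap_cons, List.flatMap_map,
        List.eraseIdx_cons_zero, Nat.add_sub_cancel]
      apply flatMap_congr_mem
      intro j _
      simp [trIdx]
    | i + 1 =>
      have hi : i < t.length := by simpa using h
      have ht : t.length = (t.length - 1) + 1 := by omega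
      simp only [List.length_cons, List.range_succ_eq_map, List.flatMap_cons, List.flatMap_map,
        List.eraseIdx_cons_succ, Nat.add_sub_cancel]
      rw [show (if (0 : ℕ) = i + 1 then ([] : List β) else F ((x :: t).getD 0 "") (trIdx (i+1) 0))
            = F x 0 by simp [trIdx]]
      have step : (List.range t.length).flatMap
            (fun j => if j + 1 = i + 1 then []
              else F ((x :: t).getD (j+1) "") (trIdx (i+1) (j+1)))
          = (List.range t.length).flatMap
            (fun j => if j = i then [] else (fun b r => F b (r + 1)) (t.getD j "") (trIdx i j)) := by
        apply flatMap_congr_mem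
        intro j _
        by_cases hji : j = i
        · simp [hji]
        · have h1 : ¬ (j + 1 = i + 1) := by omega
          have h2 : trIdx (i+1) (j+1) = trIdx i j + 1 := by unfold trIdx; split_ifs <;> omega
          simp [hji, h2]
      rw [step, ih i (fun b r => F b (r + 1)) hi]
      conv_rhs => rw [ht, List.range_succ_eq_map]
      simp [List.flatMap_map]

-- mapping over a list via its indices
theorem range_flatMap_singleton {β : Type} (l : List String) (f : String → β) :
    (List.range l.length).flatMap (fun t => [f (l.getD t "")]) = l.map f := by
  induction l with
  | nil => rfl
  | cons x t ih =>
    simp only [List.length_cons, List.range_succ_eq_map, List.flatMap_cons, List.flatMap_map]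
    simpa [List.getD_cons_succ] using congrArg (fun r => [f x] ++ r) (by simpa using ih)

-- pickOne described via indices
theorem pickOne_spec (xs : List String) :
    pickOne xs = (List.range xs.length).map (fun i => (xs.getD i "", xs.eraseIdx i)) := by
  induction xs with
  | nil => rfl
  | cons x t ih =>
    simp only [pickOne, ih, List.length_cons, List.range_succ_eq_map, List.map_cons, List.map_map]
    refine congrArg (fun r => (x, t) :: r) ?_
    simp [Function.comp]

theorem foldl_app {α : Type} (f : α → List String) :
    ∀ (l : List α) (acc : List String),
      l.foldl (fun c x => c ++ f x) acc = acc ++ l.flatMap f := by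
  intro l
  induction l with
  | nil => simp
  | cons a l ih => intro acc; simp [List.foldl_cons, ih, List.flatMap_cons]

-- A as nested flatMaps
theorem word_builder_flat (xs : List String) :
    word_builder xs =
      (List.range xs.length).flatMap (fun i =>
        (List.range xs.length).flatMap (fun j =>
          (List.range xs.length).flatMap (fun k =>
            if i ≠ j ∧ j ≠ k ∧ i ≠ k then
              [xs.getD i "" ++ xs.getD j "" ++ xs.getD k ""] else []))) := by
  unfold word_builder
  have hk : ∀ (i j : ℕ) (c : List String),
      (List.range xs.length).foldl (fun c k =>
        if i ≠ j ∧ j ≠ k ∧ i ≠ k then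
          c ++ [xs.getD i "" ++ xs.getD j "" ++ xs.getD k ""] else c) c
      = c ++ (List.range xs.length).flatMap (fun k =>
          if i ≠ j ∧ j ≠ k ∧ i ≠ k then
            [xs.getD i "" ++ xs.getD j "" ++ xs.getD k ""] else []) := by
    intro i j c
    rw [show (fun c k => if i ≠ j ∧ j ≠ k ∧ i ≠ k then
          c ++ [xs.getD i "" ++ xs.getD j "" ++ xs.getD k ""] else c)
        = (fun c k => c ++ (if i ≠ j ∧ j ≠ k ∧ i ≠ k then
            [xs.getD i "" ++ xs.getD j "" ++ xs.getD k ""] else [])) from by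
      funext c k; split_ifs <;> simp]
    exact foldl_app _ _ _
  have hj : ∀ (i : ℕ) (c : List String),
      (List.range xs.length).foldl (fun c j =>
        (List.range xs.length).foldl (fun c k =>
          if i ≠ j ∧ j ≠ k ∧ i ≠ k then
            c ++ [xs.getD i "" ++ xs.getD j "" ++ xs.getD k ""] else c) c) c
      = c ++ (List.range xs.length).flatMap (fun j =>
          (List.range xs.length).flatMap (fun k =>
            if i ≠ j ∧ j ≠ k ∧ i ≠ k then
              [xs.getD i "" ++ xs.getD j "" ++ xs.getD k ""] else [])) := by
    intro i c
    rw [show (fun c j => (List.range xs.length).foldl (fun c k =>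
          if i ≠ j ∧ j ≠ k ∧ i ≠ k then
            c ++ [xs.getD i "" ++ xs.getD j "" ++ xs.getD k ""] else c) c)
        = (fun c j => c ++ (List.range xs.length).flatMap (fun k =>
            if i ≠ j ∧ j ≠ k ∧ i ≠ k then
              [xs.getD i "" ++ xs.getD j "" ++ xs.getD k ""] else [])) from by
      funext c j; exact hk i j c]
    exact foldl_app _ _ _
  rw [show (fun c i => (List.range xs.length).foldl (fun c j =>
        (List.range xs.length).foldl (fun c k =>
          if i ≠ j ∧ j ≠ k ∧ i ≠ k then
            c ++ [xs.getD i "" ++ xs.getD j "" ++ xs.getD k ""] else c) c) c)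
      = (fun c i => c ++ (List.range xs.length).flatMap (fun j =>
          (List.range xs.length).flatMap (fun k =>
            if i ≠ j ∧ j ≠ k ∧ i ≠ k then
              [xs.getD i "" ++ xs.getD j "" ++ xs.getD k ""] else []))) from by
    funext c i; exact hj i c]
  rw [foldl_app]; simp

-- ===== VERDICT (by name: the statement is the Claim_ definition above) =====
theorem word_builder_spec : Claim_equal_word_builder := by
  intro xs _
  show word_builder xs = word_builder_alt xs
  rw [word_builder_flat]
  unfold word_builder_alt
  rw [pickOne_spec, List.flatMap_map]
  apply flatMap_congr_mem
  intro i hi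
  have hi' : i < xs.length := List.mem_range.mp hi
  set a := xs.getD i "" with ha
  set r := xs.eraseIdx i with hr
  have hrlen : r.length = xs.length - 1 := by simp [hr, List.length_eraseIdx_of_lt hi']
  -- step 1: reshape the guard into nested single-index ifs and pull the j=i case out
  have step1 :
      (List.range xs.length).flatMap (fun j =>
        (List.range xs.length).flatMap (fun k =>
          if i ≠ j ∧ j ≠ k ∧ i ≠ k then [a ++ xs.getD j "" ++ xs.getD k ""] else []))
      = (List.range xs.length).flatMap (fun j =>
          if j = i then [] else
            (fun b j' => (List.range xs.length).flatMap (fun k =>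
              if k = i then [] else
                if trIdx i k = j' then [] else [a ++ b ++ xs.getD k ""]))
            (xs.getD j "") (trIdx i j)) := by
    apply flatMap_congr_mem
    intro j _
    by_cases hji : j = i
    · simp [hji, flatMap_nil_fun]
    · simp only [if_neg hji]
      apply flatMap_congr_mem
      intro k _
      by_cases hki : k = i
      · simp [hki, hji]
      · have : (trIdx i k = trIdx i j) ↔ k = j := trIdx_inj hki hji
        by_cases hkj : k = j
        · simp [hkj, hji]
        · have h1 : ¬ trIdx i k = trIdx i j := fun h => hkj (this.mp h)
          have : i ≠ j ∧ j ≠ k ∧ i ≠ k := ⟨fun h => hji h.symm, fun h => hkj h.symm, fun h => hki h.symm⟩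
          simp [this, h1, if_neg hki]
  rw [step1, se xs i (fun b j' =>
      (List.range xs.length).flatMap (fun k =>
        if k = i then [] else
          if trIdx i k = j' then [] else [a ++ b ++ xs.getD k ""])) hi']
  rw [← hrlen, ← hr]
  dsimp only
  conv_rhs => rw [pickOne_spec, List.flatMap_map]
  -- now the j' loop over r
  apply flatMap_congr_mem
  intro j' hj'
  have hj'lt : j' < r.length := by
    have := List.mem_range.mp hj'; omega
  -- inner k loop over r excluding j'
  have inner :
      (List.range xs.length).flatMap (fun k =>
        if k = i then [] else
          if trIdx i k = j' then [] else [a ++ r.getD j' "" ++ xs.getD k ""])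
      = (List.range r.length).flatMap (fun k' =>
          if k' = j' then [] else [a ++ r.getD j' "" ++ r.getD k' ""]) := by
    have := se (β := String) xs i
      (fun b k' => if k' = j' then [] else [a ++ r.getD j' "" ++ b]) hi'
    rw [← hrlen, ← hr] at this
    exact this
  rw [inner]
  have := se (β := String) r j' (fun b _ => [a ++ r.getD j' "" ++ b]) hj'lt
  rw [this]
  rw [show r.length - 1 = (r.eraseIdx j').length by simp [List.length_eraseIdx_of_lt hj'lt]]
  exact range_flatMap_singleton (r.eraseIdx j') _
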